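-- pv_equiv track=rewrite | github.com/KevCast1604/AutoMonitor | auto-monitor/src/automonitor/infrastructure/sqlite_repo.py | _diff_counts
-- ===== SOURCE A (Python) =====
-- from typing import Optional, TypedDict, List, Dict, Any, Tuple
--
-- def _diff_counts(prev: Dict[str, Any], curr: Dict[str, Any]) -> Tuple[int, int, int]:
--     prev_keys = set(prev.keys())
--     curr_keys = set(curr.keys())
--
--     added_keys = curr_keys - prev_keys
--     removed_keys = prev_keys - curr_keys
--     common_keys = prev_keys & curr_keys
--
--     updated = 0
--     for k in common_keys:
--         if prev.get(k) != curr.get(k):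
--             updated += 1
--     return (len(added_keys), len(removed_keys), updated)
-- ===== SOURCE B (Python) =====
-- def _diff_counts(prev, curr):
--     # Single pass over curr; removed is derived arithmetically, no sets built.
--     added = common = updated = 0
--     for k, v in curr.items():
--         if k in prev:
--             common += 1
--             if prev[k] != v:
--                 updated += 1
--         else:
--             added += 1
--     return (added, len(prev) - common, updated)
-- ===== Notes on version B (the rewrite author's own statement) =====
-- stated objective: simpler
-- what changed: Replaced the three set constructions (difference, difference, intersection) plus a common-keys loop by a single pass over curr.items() keeping added/common/updated counters, with removed derived arithmetically as len(prev) - common.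
import Mathlib
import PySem

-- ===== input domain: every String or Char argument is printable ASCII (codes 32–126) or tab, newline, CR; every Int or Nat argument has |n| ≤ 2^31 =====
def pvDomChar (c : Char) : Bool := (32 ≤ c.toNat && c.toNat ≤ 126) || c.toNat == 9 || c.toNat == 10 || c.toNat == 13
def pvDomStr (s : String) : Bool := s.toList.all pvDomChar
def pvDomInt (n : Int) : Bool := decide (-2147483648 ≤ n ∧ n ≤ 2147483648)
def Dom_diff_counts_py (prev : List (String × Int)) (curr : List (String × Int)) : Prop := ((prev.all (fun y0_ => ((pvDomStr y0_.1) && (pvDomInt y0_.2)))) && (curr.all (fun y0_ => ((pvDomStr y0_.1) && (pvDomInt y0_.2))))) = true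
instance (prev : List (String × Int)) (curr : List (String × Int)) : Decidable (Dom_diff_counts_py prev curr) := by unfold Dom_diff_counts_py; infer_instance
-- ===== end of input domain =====

-- B replaces A's three set operations plus a common-keys loop by one pass over curr with
-- counters, deriving removed = len(prev) - common; objective: simpler.

-- ===== PORT A =====
def diff_counts_py (prev : List (String × Int)) (curr : List (String × Int)) : Int × Int × Int :=
  let p := PySem.Dict.ofList prev
  let c := PySem.Dict.ofList curr
  let prevKeys := PySem.Set.ofList p.keys
  let currKeys := PySem.Set.ofList c.keys
  let addedKeys := PySem.Set.diff currKeys prevKeys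
  let removedKeys := PySem.Set.diff prevKeys currKeys
  let commonKeys := PySem.Set.inter prevKeys currKeys
  -- sum over the common-keys set: order-independent
  let updated : Int := commonKeys.foldl (fun u k => if p.get? k ≠ c.get? k then u + 1 else u) 0
  (PySem.Set.len addedKeys, PySem.Set.len removedKeys, updated)

-- ===== PORT B =====
def diff_counts_py_alt (prev : List (String × Int)) (curr : List (String × Int)) : Int × Int × Int :=
  let p := PySem.Dict.ofList prev
  let c := PySem.Dict.ofList curr
  let acc := c.items.foldl
    (fun (acc : Int × Int × Int) kv =>
      if p.contains kv.1 then
        (acc.1, acc.2.1 + 1, if p.get? kv.1 ≠ some kv.2 then acc.2.2 + 1 else acc.2.2)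
      else
        (acc.1 + 1, acc.2.1, acc.2.2))
    (0, 0, 0)
  (acc.1, (p.size : Int) - acc.2.1, acc.2.2)

-- ===== PRECONDITION & SPEC =====
def Spec_diff_counts_py (prev : List (String × Int)) (curr : List (String × Int)) (out : Int × Int × Int) : Prop := out = diff_counts_py_alt prev curr
instance (prev : List (String × Int)) (curr : List (String × Int)) (out : Int × Int × Int) : Decidable (Spec_diff_counts_py prev curr out) := by unfold Spec_diff_counts_py; infer_instance

-- ===== CLAIM (what is proved, stated in full; the proofs are below) =====
def Claim_equal_diff_counts_py : Prop := ∀ (prev : List (String × Int)) (curr : List (String × Int)), Dom_diff_counts_py prev curr → Spec_diff_counts_py prev curr (diff_counts_py prev curr)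

-- ===== LEMMAS AND PROOFS =====

-- B's three-counter fold is three countP's over curr's items.
theorem fold3_eq (p : PySem.Dict String Int) (l : List (String × Int)) (a b u : Int) :
    l.foldl
      (fun (acc : Int × Int × Int) kv =>
        if p.contains kv.1 then
          (acc.1, acc.2.1 + 1, if p.get? kv.1 ≠ some kv.2 then acc.2.2 + 1 else acc.2.2)
        else
          (acc.1 + 1, acc.2.1, acc.2.2))
      (a, b, u)
    = (a + (l.countP (fun kv => !p.contains kv.1) : Int),
       b + (l.countP (fun kv => p.contains kv.1) : Int),
       u + (l.countP (fun kv => p.contains kv.1 && p.get? kv.1 ≠ some kv.2) : Int)) := by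
  induction l generalizing a b u with
  | nil => simp
  | cons kv t ih =>
    rw [List.foldl_cons]
    by_cases h : p.contains kv.1
    · by_cases h2 : p.get? kv.1 ≠ some kv.2
      · rw [if_pos h, if_pos h2, ih]
        simp [h, h2, Prod.ext_iff]; omega
      · rw [if_pos h, if_neg h2, ih]
        simp [h, h2, Prod.ext_iff]; omega
    · rw [if_neg h, ih]
      simp [h, Prod.ext_iff]; omega

-- two Nodup lists filtered to the same membership condition have equal length
theorem countP_symm {α : Type} [DecidableEq α] (xs ys : List α)
    (hx : xs.Nodup) (hy : ys.Nodup) (q : α → Bool) :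
    (xs.countP (fun k => decide (k ∈ ys) && q k)) = (ys.countP (fun k => decide (k ∈ xs) && q k)) := by
  have h1 : (xs.filter (fun k => decide (k ∈ ys) && q k)).Perm
      (ys.filter (fun k => decide (k ∈ xs) && q k)) := by
    rw [List.perm_ext_iff_of_nodup (hx.filter _) (hy.filter _)]
    intro a
    simp only [List.mem_filter, Bool.and_eq_true, decide_eq_true_eq]
    tauto
  have := h1.length_eq
  simpa [List.countP_eq_length_filter] using this

-- ===== VERDICT (by name: the statement is the Claim_ definition above) =====
theorem diff_counts_py_spec : Claim_equal_diff_counts_py := by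
  intro prev curr _
  unfold Spec_diff_counts_py
  simp only [diff_counts_py, diff_counts_py_alt]
  rw [fold3_eq]
  set P := PySem.Dict.ofList prev with hP
  set C := PySem.Dict.ofList curr with hC
  have hpk : P.keys.Nodup := PySem.Dict.nodup_keys_ofList prev
  have hck : C.keys.Nodup := PySem.Dict.nodup_keys_ofList curr
  rw [PySem.Set.ofList_eq_self_of_nodup _ hpk, PySem.Set.ofList_eq_self_of_nodup _ hck,
    PySem.List.foldl_ite_add_one]
  -- item-level predicates of B's pass reduce to key-level predicates
  have hitems1 : List.countP (fun kv => !P.contains kv.1) C.items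
      = List.countP (fun k => !decide (k ∈ P.keys)) C.keys := by
    rw [show C.keys = C.items.map Prod.fst from rfl, List.countP_map]
    exact List.countP_congr (fun kv _ => by
      simp [PySem.Dict.contains_eq_decide_mem_keys, Function.comp])
  have hitems2 : List.countP (fun kv => P.contains kv.1) C.items
      = List.countP (fun k => decide (k ∈ P.keys)) C.keys := by
    rw [show C.keys = C.items.map Prod.fst from rfl, List.countP_map]
    exact List.countP_congr (fun kv _ => by
      simp [PySem.Dict.contains_eq_decide_mem_keys, Function.comp])
  have hitems3 : List.countP (fun kv => P.contains kv.1 && decide (P.get? kv.1 ≠ some kv.2)) C.items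
      = List.countP (fun k => decide (k ∈ P.keys) && decide (P.get? k ≠ C.get? k)) C.keys := by
    rw [show C.keys = C.items.map Prod.fst from rfl, List.countP_map]
    refine List.countP_congr (fun kv hkv => ?_)
    have hg : C.get? kv.1 = some kv.2 := PySem.Dict.get?_of_mem_items C hkv hck
    simp [PySem.Dict.contains_eq_decide_mem_keys, hg, Function.comp]
  -- A's set operations as key-level counts
  have hA1 : PySem.Set.len (PySem.Set.diff C.keys P.keys)
      = (List.countP (fun k => !decide (k ∈ P.keys)) C.keys : Int) := by
    simp only [PySem.Set.diff, PySem.Set.len, ← List.countP_eq_length_filter]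
    exact_mod_cast congrArg Nat.cast (List.countP_congr (p := fun x => !PySem.Set.contains _ x) (fun x _ => by simp))
  have hA2 : PySem.Set.len (PySem.Set.diff P.keys C.keys)
      = (List.countP (fun k => !decide (k ∈ C.keys)) P.keys : Int) := by
    simp only [PySem.Set.diff, PySem.Set.len, ← List.countP_eq_length_filter]
    exact_mod_cast congrArg Nat.cast (List.countP_congr (p := fun x => !PySem.Set.contains _ x) (fun x _ => by simp))
  have hA3 : List.countP (fun k => decide (P.get? k ≠ C.get? k)) (PySem.Set.inter P.keys C.keys)
      = List.countP (fun k => decide (k ∈ C.keys) && decide (P.get? k ≠ C.get? k)) P.keys := by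
    simp only [PySem.Set.inter, List.countP_filter]
    exact List.countP_congr (fun x _ => by simp [Bool.and_comm])
  -- size bookkeeping and intersection-count symmetry
  have hsz : (P.size : Int) = (P.keys.length : Int) := by
    simp [PySem.Dict.size, PySem.Dict.keys]
  have hsplit : P.keys.length = List.countP (fun k => decide (k ∈ C.keys)) P.keys
      + List.countP (fun k => !decide (k ∈ C.keys)) P.keys := by
    simpa using List.length_eq_countP_add_countP (fun k => decide (k ∈ C.keys)) (l := P.keys)
  have hsym : List.countP (fun k => decide (k ∈ P.keys)) C.keys
      = List.countP (fun k => decide (k ∈ C.keys)) P.keys := by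
    have := countP_symm C.keys P.keys hck hpk (fun _ => true)
    simpa using this
  have hsym2 : List.countP (fun k => decide (k ∈ C.keys) && decide (P.get? k ≠ C.get? k)) P.keys
      = List.countP (fun k => decide (k ∈ P.keys) && decide (P.get? k ≠ C.get? k)) C.keys := by
    simpa using (countP_symm P.keys C.keys hpk hck (fun k => decide (P.get? k ≠ C.get? k)))
  simp only [Prod.ext_iff]
  refine ⟨?_, ?_, ?_⟩
  · rw [hA1, hitems1]; ring
  · rw [hA2, hitems2, hsym, hsz]
    omega
  · rw [hA3, hitems3, hsym2]
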